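-- pv_equiv track=rewrite | github.com/Potterhead007/aether-band-engine | src/aether/voice/arrangement/harmony.py | _get_chord_tone_below
-- ===== SOURCE A (Python) =====
-- from typing import Dict, List, Optional, Tuple
--
-- def _get_chord_tone_below(
--
--     melody_pitch: int,
--     chord: List[int],
-- ) -> int:
--     """Get nearest chord tone below melody."""
--     melody_pc = melody_pitch % 12
--     melody_octave = melody_pitch // 12
--
--     # Find chord tones below
--     for offset in range(1, 13):
--         candidate_pc = (melody_pc - offset) % 12
--         if candidate_pc in chord:
--             return melody_pitch - offset
--
--     return melody_pitch - 3  # Default to minor third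
-- ===== SOURCE B (Python) =====
-- def _get_chord_tone_below(melody_pitch, chord):
--     """Get nearest chord tone below melody."""
--     melody_pc = melody_pitch % 12
--     best = None
--     for v in chord:
--         if 0 <= v <= 11:
--             off = (melody_pc - v) % 12
--             if off == 0:
--                 off = 12
--             if best is None or off < best:
--                 best = off
--     return melody_pitch - (3 if best is None else best)
-- ===== Notes on version B (the rewrite author's own statement) =====
-- stated objective: faster
-- what changed: B makes one pass over the chord keeping a running minimum of the downward offset ((melody_pc - v) % 12, 0 remapped to 12) instead of A's scan over the 12 candidate offsets, each doing a linear membership test into the chord list.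
import Mathlib
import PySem

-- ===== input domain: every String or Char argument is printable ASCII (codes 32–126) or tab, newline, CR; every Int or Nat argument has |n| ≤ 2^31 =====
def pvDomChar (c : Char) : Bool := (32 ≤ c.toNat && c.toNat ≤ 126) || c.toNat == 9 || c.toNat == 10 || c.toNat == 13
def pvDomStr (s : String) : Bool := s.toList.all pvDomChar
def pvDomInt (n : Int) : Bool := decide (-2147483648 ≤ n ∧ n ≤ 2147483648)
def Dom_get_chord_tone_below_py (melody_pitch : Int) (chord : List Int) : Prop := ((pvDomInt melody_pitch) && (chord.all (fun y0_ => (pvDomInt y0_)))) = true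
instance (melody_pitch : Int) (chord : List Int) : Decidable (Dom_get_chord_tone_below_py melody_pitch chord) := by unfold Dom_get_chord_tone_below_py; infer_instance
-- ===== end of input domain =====

-- B keeps a running minimum of downward offsets over the chord tones instead of A's
-- first-hit scan over the 12 candidate offsets; same return value (alternative decomposition).

-- ===== PORT A =====
-- A: scan offsets 1..12, return at the first offset whose candidate pitch class is in the chord.
def get_chord_tone_below_py (melody_pitch : Int) (chord : List Int) : Int :=
  let melody_pc := PySem.Int.mod melody_pitch 12
  let _melody_octave := PySem.Int.floordiv melody_pitch 12
  match (PySem.List.pyRange 1 13 1).find?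
      (fun offset => chord.contains (PySem.Int.mod (melody_pc - offset) 12)) with
  | some offset => melody_pitch - offset
  | none => melody_pitch - 3

-- ===== PORT B =====
-- B's loop body: fold step keeping the minimal offset seen so far.
def pvStepB (melody_pc : Int) (best : Option Int) (v : Int) : Option Int :=
  if 0 ≤ v ∧ v ≤ 11 then
    let off := PySem.Int.mod (melody_pc - v) 12
    let off := if off = 0 then 12 else off
    match best with
    | none => some off
    | some b => if off < b then some off else some b
  else best

def get_chord_tone_below_py_alt (melody_pitch : Int) (chord : List Int) : Int :=
  let melody_pc := PySem.Int.mod melody_pitch 12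
  match chord.foldl (pvStepB melody_pc) none with
  | none => melody_pitch - 3
  | some best => melody_pitch - best

-- ===== PRECONDITION & SPEC =====
def Spec_get_chord_tone_below_py (melody_pitch : Int) (chord : List Int) (out : Int) : Prop := out = get_chord_tone_below_py_alt melody_pitch chord
instance (melody_pitch : Int) (chord : List Int) (out : Int) : Decidable (Spec_get_chord_tone_below_py melody_pitch chord out) := by unfold Spec_get_chord_tone_below_py; infer_instance

-- ===== CLAIM (what is proved, stated in full; the proofs are below) =====
def Claim_equal_get_chord_tone_below_py : Prop := ∀ (melody_pitch : Int) (chord : List Int), Dom_get_chord_tone_below_py melody_pitch chord → Spec_get_chord_tone_below_py melody_pitch chord (get_chord_tone_below_py melody_pitch chord)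

-- ===== LEMMAS AND PROOFS =====

-- the offset B assigns to a chord tone v
def pvOff (pc v : Int) : Int :=
  let o := PySem.Int.mod (pc - v) 12
  if o = 0 then 12 else o

lemma pvStepB_off_none (pc : Int) (v : Int) (h : 0 ≤ v ∧ v ≤ 11) :
    pvStepB pc none v = some (pvOff pc v) := by
  simp [pvStepB, pvOff, h]

lemma pvStepB_off_some (pc : Int) (b v : Int) (h : 0 ≤ v ∧ v ≤ 11) :
    pvStepB pc (some b) v = if pvOff pc v < b then some (pvOff pc v) else some b := by
  simp [pvStepB, pvOff, h]

lemma pvOff_bounds (pc v : Int) : 1 ≤ pvOff pc v ∧ pvOff pc v ≤ 12 := by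
  simp only [pvOff, PySem.Int.mod_eq_emod_of_pos (a := pc - v) (b := 12) (by omega)]
  split <;> omega

-- fold result none ⇒ no chord tone qualifies
lemma pvStepB_not (pc : Int) (acc : Option Int) (x : Int) (hx : ¬(0 ≤ x ∧ x ≤ 11)) :
    pvStepB pc acc x = acc := by simp [pvStepB, hx]

lemma pvStepB_ne_none (pc : Int) (acc : Option Int) (x : Int) (hx : 0 ≤ x ∧ x ≤ 11) :
    pvStepB pc acc x ≠ none := by
  cases acc with
  | none => rw [pvStepB_off_none pc x hx]; simp
  | some b => rw [pvStepB_off_some pc b x hx]; split <;> simp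

lemma foldB_none (pc : Int) (chord : List Int) (acc : Option Int)
    (h : chord.foldl (pvStepB pc) acc = none) :
    acc = none ∧ ∀ v ∈ chord, ¬(0 ≤ v ∧ v ≤ 11) := by
  induction chord generalizing acc with
  | nil => simpa using h
  | cons x xs ih =>
    simp only [List.foldl_cons] at h
    obtain ⟨h1, h2⟩ := ih _ h
    by_cases hx : 0 ≤ x ∧ x ≤ 11
    · exact absurd h1 (pvStepB_ne_none pc acc x hx)
    · rw [pvStepB_not pc acc x hx] at h1
      refine ⟨h1, fun v hv => ?_⟩
      rcases List.mem_cons.mp hv with rfl | hv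
      · exact hx
      · exact h2 v hv

-- fold result some k ⇒ k is the offset of some qualifying chord tone (or came from acc)
lemma foldB_some_mem (pc : Int) (chord : List Int) (acc : Option Int) (k : Int)
    (h : chord.foldl (pvStepB pc) acc = some k) :
    acc = some k ∨ ∃ v ∈ chord, (0 ≤ v ∧ v ≤ 11) ∧ pvOff pc v = k := by
  induction chord generalizing acc with
  | nil => left; simpa using h
  | cons x xs ih =>
    simp only [List.foldl_cons] at h
    rcases ih _ h with h1 | ⟨v, hv, hq, ho⟩
    · by_cases hx : 0 ≤ x ∧ x ≤ 11
      · cases acc with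
        | none =>
          rw [pvStepB_off_none pc x hx] at h1
          right; exact ⟨x, by simp, hx, Option.some.inj h1⟩
        | some b =>
          rw [pvStepB_off_some pc b x hx] at h1
          split at h1
          · right; exact ⟨x, by simp, hx, Option.some.inj h1⟩
          · left; rw [Option.some.inj h1]
      · left; rwa [pvStepB_not pc acc x hx] at h1
    · right; exact ⟨v, List.mem_cons_of_mem _ hv, hq, ho⟩

-- fold result some k ⇒ k is ≤ every qualifying offset and ≤ acc's value
lemma foldB_some_min (pc : Int) (chord : List Int) (acc : Option Int) (k : Int)
    (h : chord.foldl (pvStepB pc) acc = some k) :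
    (∀ b, acc = some b → k ≤ b) ∧ ∀ v ∈ chord, (0 ≤ v ∧ v ≤ 11) → k ≤ pvOff pc v := by
  induction chord generalizing acc with
  | nil =>
    simp only [List.foldl_nil] at h
    refine ⟨fun b hb => ?_, by simp⟩
    rw [h] at hb
    exact le_of_eq (Option.some.inj hb)
  | cons x xs ih =>
    simp only [List.foldl_cons] at h
    obtain ⟨ih1, ih2⟩ := ih _ h
    by_cases hx : 0 ≤ x ∧ x ≤ 11
    · refine ⟨fun b hb => ?_, fun v hv hq => ?_⟩
      · subst hb
        rw [pvStepB_off_some pc b x hx] at ih1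
        have h5 := ih1 (if pvOff pc x < b then pvOff pc x else b)
          (by rw [apply_ite some])
        split at h5 <;> omega
      · rcases List.mem_cons.mp hv with rfl | hv
        · cases acc with
          | none => exact ih1 _ (pvStepB_off_none pc v hx)
          | some b =>
            rw [pvStepB_off_some pc b v hx] at ih1
            have h5 := ih1 (if pvOff pc v < b then pvOff pc v else b)
              (by rw [apply_ite some])
            split at h5 <;> omega
        · exact ih2 v hv hq
    · refine ⟨fun b hb => ih1 b (by rw [pvStepB_not pc acc x hx, hb]), fun v hv hq => ?_⟩
      rcases List.mem_cons.mp hv with rfl | hv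
      · exact absurd hq hx
      · exact ih2 v hv hq

-- A's membership test at offset o ∈ [1,12] holds iff the chord tone (pc-o)%12 qualifies with offset o
lemma pvOff_inv (pc o : Int) (_hpc : 0 ≤ pc ∧ pc ≤ 11) (ho : 1 ≤ o ∧ o ≤ 12) :
    pvOff pc (PySem.Int.mod (pc - o) 12) = o ∧
    0 ≤ PySem.Int.mod (pc - o) 12 ∧ PySem.Int.mod (pc - o) 12 ≤ 11 := by
  simp only [pvOff, PySem.Int.mod_eq_emod_of_pos (b := 12) (by omega)]
  split <;> omega

lemma pvOff_self (pc v : Int) (_hpc : 0 ≤ pc ∧ pc ≤ 11) (hv : 0 ≤ v ∧ v ≤ 11) :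
    PySem.Int.mod (pc - pvOff pc v) 12 = v := by
  simp only [pvOff, PySem.Int.mod_eq_emod_of_pos (b := 12) (by omega)]
  split <;> omega

lemma find_range12_eq (p : Int → Bool) (k : Int) (h1 : 1 ≤ k) (h2 : k ≤ 12)
    (hk : p k = true) (hlt : ∀ j, 1 ≤ j → j < k → p j = false) :
    ([1,2,3,4,5,6,7,8,9,10,11,12] : List Int).find? p = some k := by
  have e1 := hlt 1; have e2 := hlt 2; have e3 := hlt 3; have e4 := hlt 4
  have e5 := hlt 5; have e6 := hlt 6; have e7 := hlt 7; have e8 := hlt 8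
  have e9 := hlt 9; have e10 := hlt 10; have e11 := hlt 11
  interval_cases k <;> simp_all [List.find?]

lemma pyRange_1_13 : PySem.List.pyRange 1 13 1 = [1,2,3,4,5,6,7,8,9,10,11,12] := by decide

-- ===== VERDICT (by name: the statement is the Claim_ definition above) =====
theorem get_chord_tone_below_py_spec : Claim_equal_get_chord_tone_below_py := by
  intro m chord _
  show _ = _
  unfold get_chord_tone_below_py get_chord_tone_below_py_alt
  simp only [pyRange_1_13]
  set pc := PySem.Int.mod m 12 with hpc
  have hpcb : 0 ≤ pc ∧ pc ≤ 11 := by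
    rw [hpc, PySem.Int.mod_eq_emod_of_pos (b := 12) (by omega)]; omega
  set p : Int → Bool := fun o => chord.contains (PySem.Int.mod (pc - o) 12) with hp
  cases hf : chord.foldl (pvStepB pc) none with
  | none =>
    have h2 := (foldB_none pc chord none hf).2
    have hnone : ([1,2,3,4,5,6,7,8,9,10,11,12] : List Int).find? p = none := by
      rw [List.find?_eq_none]
      intro o ho
      have hob : 1 ≤ o ∧ o ≤ 12 := by fin_cases ho <;> omega
      simp only [hp, List.contains_iff_mem]
      intro hmem
      exact h2 _ hmem ⟨(pvOff_inv pc o hpcb hob).2.1, (pvOff_inv pc o hpcb hob).2.2⟩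
    simp [hnone]
  | some k =>
    rcases foldB_some_mem pc chord none k hf with h | ⟨v, hv, hq, ho⟩
    · simp at h
    have hmin := (foldB_some_min pc chord none k hf).2
    have hkb : 1 ≤ k ∧ k ≤ 12 := ho ▸ pvOff_bounds pc v
    have hpk : p k = true := by
      simp only [hp, List.contains_iff_mem]
      rw [← ho, pvOff_self pc v hpcb hq]; exact hv
    have hplt : ∀ j, 1 ≤ j → j < k → p j = false := by
      intro j hj1 hjk
      by_contra hpj
      simp only [hp, Bool.not_eq_false, List.contains_iff_mem] at hpj
      obtain ⟨hinv, hb1, hb2⟩ := pvOff_inv pc j hpcb ⟨hj1, by omega⟩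
      have := hmin _ hpj ⟨hb1, hb2⟩
      omega
    have hfind := find_range12_eq p k hkb.1 hkb.2 hpk hplt
    simp [hfind]
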